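-- pv_equiv track=rewrite | github.com/miliar/Code_Jam_Webscraper | solutions_python/Problem_155/1386.py | solve
-- ===== SOURCE A (Python) =====
-- def solve(tab):
--     acc = 0
--     res = 0
--     for i, val in enumerate(tab[:-1]):
--         acc += int(val)
--         if acc < i + 1:
--             res += i + 1 - acc
--             acc += i + 1 - acc
--     return res
-- ===== SOURCE B (Python) =====
-- def solve(tab):
--     # Staged passes: parse once, build the prefix-sum list, then take the
--     # maximum deficit i + 1 - S_i (at least 0).
--     vals = [int(v) for v in tab[:-1]]
--     sums = []
--     s = 0
--     for v in vals:
--         s += v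
--         sums.append(s)
--     return max([0] + [i + 1 - s for i, s in enumerate(sums)])
-- ===== Notes on version B (the rewrite author's own statement) =====
-- stated objective: alternative
-- what changed: B replaces A's single self-adjusting accumulator loop (which mixes the answer back into the running sum and bumps it conditionally) by three staged passes: parse the values, build the true prefix-sum list, then return the maximum of 0 and the deficits i+1-S_i.
import Mathlib
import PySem

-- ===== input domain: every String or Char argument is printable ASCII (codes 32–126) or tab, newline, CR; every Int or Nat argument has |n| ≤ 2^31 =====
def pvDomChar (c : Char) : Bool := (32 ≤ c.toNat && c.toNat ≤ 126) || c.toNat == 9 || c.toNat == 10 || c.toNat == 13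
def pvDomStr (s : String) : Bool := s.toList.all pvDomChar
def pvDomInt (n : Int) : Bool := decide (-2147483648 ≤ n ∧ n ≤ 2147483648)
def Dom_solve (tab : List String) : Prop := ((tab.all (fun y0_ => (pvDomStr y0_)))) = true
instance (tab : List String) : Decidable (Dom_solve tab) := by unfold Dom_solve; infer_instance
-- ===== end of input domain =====

-- B replaces A's self-adjusting accumulator loop by three staged passes:
-- parse the values, build the true prefix-sum list, then take the maximum
-- of 0 and the deficits i+1-S_i. (objective: alternative, same cost)

-- ===== PORT A =====
def solve (tab : List String) : Int :=
  (((PySem.List.enumerate (PySem.List.slice tab none (some (-1))) 0).foldl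
      (fun (st : Int × Int) (p : Int × String) =>
        let acc := st.1 + (PySem.Int.ofStr? p.2).getD 0
        if acc < p.1 + 1 then (acc + (p.1 + 1 - acc), st.2 + (p.1 + 1 - acc))
        else (acc, st.2))
      (0, 0))).2

-- ===== PORT B =====
def solve_alt (tab : List String) : Int :=
  let vals := (PySem.List.slice tab none (some (-1))).map
      (fun v => (PySem.Int.ofStr? v).getD 0)
  let sums := (vals.foldl
      (fun (p : List Int × Int) v => (p.1 ++ [p.2 + v], p.2 + v)) ([], 0)).1
  (PySem.List.max?
      ((0 : Int) :: (PySem.List.enumerate sums 0).map (fun p => p.1 + 1 - p.2))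
      (fun y => y)).getD 0

-- ===== PRECONDITION & SPEC =====
-- Pre_: every element of tab[:-1] is int()-parsable; otherwise A (and B) raise ValueError.
def Pre_solve (tab : List String) : Prop :=
  ∀ s ∈ tab.dropLast, (PySem.Int.ofStr? s).isSome = true
instance (tab : List String) : Decidable (Pre_solve tab) := by unfold Pre_solve; infer_instance
def pvWitness_solve : List String := ["1", "-2", "3", "x"]
def Spec_solve (tab : List String) (out : Int) : Prop := out = solve_alt tab
instance (tab : List String) (out : Int) : Decidable (Spec_solve tab out) := by unfold Spec_solve; infer_instance

-- ===== CLAIM (what is proved, stated in full; the proofs are below) =====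
def Claim_equal_solve : Prop := ∀ (tab : List String), Dom_solve tab → Pre_solve tab → Spec_solve tab (solve tab)

-- ===== LEMMAS AND PROOFS =====

-- A's loop body over already-parsed integer pairs.
def stepAI (st : Int × Int) (p : Int × Int) : Int × Int :=
  let acc := st.1 + p.2
  if acc < p.1 + 1 then (acc + (p.1 + 1 - acc), st.2 + (p.1 + 1 - acc))
  else (acc, st.2)

-- true-prefix-sum / running-max loop body (proof intermediate).
def stepBI (st : Int × Int) (p : Int × Int) : Int × Int :=
  let S := st.1 + p.2
  (S, max st.2 (p.1 + 1 - S))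

-- the prefix sums of xs starting from s.
def sumsOf : List Int → Int → List Int
  | [], _ => []
  | v :: xs, s => (s + v) :: sumsOf xs (s + v)

theorem enumerate_map {α β : Type} (g : α → β) (l : List α) (k : Int) :
    PySem.List.enumerate (l.map g) k
      = (PySem.List.enumerate l k).map (fun p => (p.1, g p.2)) := by
  induction l generalizing k with
  | nil => simp [PySem.List.enumerate_nil]
  | cons a l ih => simp [PySem.List.enumerate_cons, ih]

-- Invariant: A's accumulator equals the true prefix sum plus the current result,
-- and A's result is the running maximum of the deficits.
theorem invA (ps : List (Int × Int)) (S res : Int) :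
    ps.foldl stepAI (S + res, res)
      = (fun q : Int × Int => (q.1 + q.2, q.2)) (ps.foldl stepBI (S, res)) := by
  induction ps generalizing S res with
  | nil => simp
  | cons p ps ih =>
    simp only [List.foldl_cons, stepAI, stepBI]
    by_cases h : S + res + p.2 < p.1 + 1
    · have hmax : max res (p.1 + 1 - (S + p.2)) = p.1 + 1 - (S + p.2) := by omega
      have e1 : S + res + p.2 + (p.1 + 1 - (S + res + p.2))
          = (S + p.2) + (p.1 + 1 - (S + p.2)) := by ring
      have e2 : res + (p.1 + 1 - (S + res + p.2)) = p.1 + 1 - (S + p.2) := by ring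
      simp only [if_pos h]
      rw [e1, e2, hmax]
      exact ih (S + p.2) (p.1 + 1 - (S + p.2))
    · have hmax : max res (p.1 + 1 - (S + p.2)) = res := by omega
      have e1 : S + res + p.2 = S + p.2 + res := by ring
      simp only [if_neg h]
      rw [e1, hmax]
      exact ih (S + p.2) res

-- The running-max loop computes the fold of max over the deficit list.
theorem stage (xs : List Int) (s res : Int) (k : Int) :
    ((PySem.List.enumerate xs k).foldl stepBI (s, res)).2
      = ((PySem.List.enumerate (sumsOf xs s) k).map
          (fun p => p.1 + 1 - p.2)).foldl max res := by
  induction xs generalizing s res k with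
  | nil => simp [sumsOf, PySem.List.enumerate_nil]
  | cons v xs ih =>
    simp only [sumsOf, PySem.List.enumerate_cons, List.map_cons, List.foldl_cons]
    exact ih (s + v) (max res (k + 1 - (s + v))) (k + 1)

-- B's list-building fold produces exactly the prefix sums.
theorem sums_fold (xs : List Int) (acc : List Int) (s : Int) :
    xs.foldl (fun (p : List Int × Int) v => (p.1 ++ [p.2 + v], p.2 + v)) (acc, s)
      = (acc ++ sumsOf xs s, s + xs.sum) := by
  induction xs generalizing acc s with
  | nil => simp [sumsOf]
  | cons v xs ih =>
    simp only [List.foldl_cons, sumsOf, List.sum_cons]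
    rw [ih]
    simp [List.append_assoc, add_assoc]

-- ===== VERDICT (by name: the statement is the Claim_ definition above) =====
theorem solve_spec : Claim_equal_solve := by
  intro tab _ _
  simp only [Spec_solve, solve, solve_alt]
  rw [sums_fold]
  simp only [List.nil_append, PySem.List.max?_id_cons, Option.getD_some]
  have h1 : (fun (st : Int × Int) (p : Int × String) =>
      let acc := st.1 + (PySem.Int.ofStr? p.2).getD 0
      if acc < p.1 + 1 then (acc + (p.1 + 1 - acc), st.2 + (p.1 + 1 - acc))
      else (acc, st.2))
    = (fun st p => stepAI st (p.1, (PySem.Int.ofStr? p.2).getD 0)) := rfl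
  rw [h1, ← List.foldl_map, ← enumerate_map (fun v => (PySem.Int.ofStr? v).getD 0)]
  have h2 := invA (PySem.List.enumerate
      ((PySem.List.slice tab none (some (-1))).map
        (fun v => (PySem.Int.ofStr? v).getD 0)) 0) 0 0
  rw [show ((0:Int) + (0:Int), (0:Int)) = ((0:Int), (0:Int)) from by norm_num] at h2
  rw [h2]
  exact stage _ 0 0 0
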